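-- pv_equiv track=rewrite | github.com/Alessandrovinci/Interactive-web-application-with-Python-Flask | COMPANY.py | regex_filt
-- ===== SOURCE A (Python) =====
-- def regex_filt(sentence):
--     b=[]
--     aaa=sentence.split(" ")
--     for i,j in enumerate(aaa):
--         if j in ['Arts','Engineering']:
--             b.append(j+' '+aaa[i+1]+' '+aaa[i+2])
--         elif j in ['Life','Social','Computer','Physical','Environmental']:
--             b.append(j+' '+aaa[i+1])
--         elif j in ['Law','Medicine','Business','Theology']:
--             b.append(j)
--     return b
-- ===== SOURCE B (Python) =====
-- def regex_filt(sentence):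
--     # Right-to-left pass: carry the next two words in variables instead of
--     # indexing aaa[i+1]/aaa[i+2]; build the result reversed, then flip it.
--     out = []
--     n1 = n2 = ''
--     for w in reversed(sentence.split(' ')):
--         if w in ('Arts', 'Engineering'):
--             out.append(w + ' ' + n1 + ' ' + n2)
--         elif w in ('Life', 'Social', 'Computer', 'Physical', 'Environmental'):
--             out.append(w + ' ' + n1)
--         elif w in ('Law', 'Medicine', 'Business', 'Theology'):
--             out.append(w)
--         n2 = n1
--         n1 = w
--     out.reverse()
--     return out
-- ===== Notes on version B (the rewrite author's own statement) =====
-- stated objective: alternative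
-- what changed: B scans the words right-to-left carrying the next two words in two variables (no enumerate, no aaa[i+1]/aaa[i+2] indexing) and reverses the accumulated result at the end; Pre_ excludes only inputs where A raises IndexError (a lookahead keyword within the last one/two words), where B instead returns a phrase padded by its empty-string initial lookahead state.
import Mathlib
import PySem

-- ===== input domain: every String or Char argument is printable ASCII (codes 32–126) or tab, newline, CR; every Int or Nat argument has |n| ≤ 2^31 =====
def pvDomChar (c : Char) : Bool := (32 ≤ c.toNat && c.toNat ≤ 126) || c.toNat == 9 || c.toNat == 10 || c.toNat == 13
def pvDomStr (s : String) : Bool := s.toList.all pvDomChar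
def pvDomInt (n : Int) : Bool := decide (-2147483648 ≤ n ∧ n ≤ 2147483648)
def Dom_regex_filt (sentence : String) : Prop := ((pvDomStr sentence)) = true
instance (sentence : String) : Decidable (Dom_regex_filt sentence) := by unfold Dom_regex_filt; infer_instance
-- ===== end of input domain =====

-- B scans the words right-to-left, carrying the next two words in variables instead of
-- indexing aaa[i+1]/aaa[i+2], and reverses the accumulated result (alternative, same cost).

-- ===== PORT A =====
-- aaa[i+1] / aaa[i+2] as pyGetD with default "": exact wherever Python does not raise
-- IndexError; the raising inputs are excluded by Pre_regex_filt.
def regex_filt (sentence : String) : List String :=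
  let aaa := (PySem.Str.split? sentence " ").getD []
  (PySem.List.enumerate aaa 0).foldl (fun b ij =>
    let i := ij.1
    let j := ij.2
    if j ∈ (["Arts", "Engineering"] : List String) then
      b ++ [j ++ " " ++ PySem.List.pyGetD aaa (i + 1) "" ++ " " ++ PySem.List.pyGetD aaa (i + 2) ""]
    else if j ∈ (["Life", "Social", "Computer", "Physical", "Environmental"] : List String) then
      b ++ [j ++ " " ++ PySem.List.pyGetD aaa (i + 1) ""]
    else if j ∈ (["Law", "Medicine", "Business", "Theology"] : List String) then
      b ++ [j]
    else b) []

-- ===== PORT B =====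
-- one step of B's reversed loop: state = (out so far, next word n1, word after next n2)
def pvStepB (st : List String × String × String) (w : String) : List String × String × String :=
  let out := st.1
  let n1 := st.2.1
  let n2 := st.2.2
  let out' :=
    if w ∈ (["Arts", "Engineering"] : List String) then
      out ++ [w ++ " " ++ n1 ++ " " ++ n2]
    else if w ∈ (["Life", "Social", "Computer", "Physical", "Environmental"] : List String) then
      out ++ [w ++ " " ++ n1]
    else if w ∈ (["Law", "Medicine", "Business", "Theology"] : List String) then
      out ++ [w]
    else out
  (out', w, n1)

def regex_filt_alt (sentence : String) : List String :=
  let ws := (PySem.Str.split? sentence " ").getD []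
  (ws.reverse.foldl pvStepB ([], "", "")).1.reverse

-- ===== PRECONDITION & SPEC =====
-- the words of the sentence, as both ports compute them
def pvWords (sentence : String) : List String := (PySem.Str.split? sentence " ").getD []

-- Pre_ excludes exactly the inputs where A raises IndexError: a keyword that captures
-- trailing words ('Arts'/'Engineering' need two, the science keywords one) occurring too
-- close to the end of the sentence.
def Pre_regex_filt (sentence : String) : Prop :=
  ∀ i < (pvWords sentence).length,
    ((pvWords sentence).getD i "" ∈ (["Arts", "Engineering"] : List String) →
      i + 2 < (pvWords sentence).length) ∧
    ((pvWords sentence).getD i "" ∈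
        (["Life", "Social", "Computer", "Physical", "Environmental"] : List String) →
      i + 1 < (pvWords sentence).length)
instance (sentence : String) : Decidable (Pre_regex_filt sentence) := by
  unfold Pre_regex_filt; infer_instance

def pvWitness_regex_filt : String := "Law and Computer Science"

def Spec_regex_filt (sentence : String) (out : List String) : Prop := out = regex_filt_alt sentence
instance (sentence : String) (out : List String) : Decidable (Spec_regex_filt sentence out) := by unfold Spec_regex_filt; infer_instance

-- ===== CLAIM (what is proved, stated in full; the proofs are below) =====
def Claim_equal_regex_filt : Prop := ∀ (sentence : String), Dom_regex_filt sentence → Pre_regex_filt sentence → Spec_regex_filt sentence (regex_filt sentence)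

-- ===== LEMMAS AND PROOFS =====

-- the contribution of one word, given the suffix after it (defaulting missing lookahead to "")
def pvPhrase (w : String) (rest : List String) : List String :=
  if w ∈ (["Arts", "Engineering"] : List String) then
    [w ++ " " ++ rest.getD 0 "" ++ " " ++ rest.getD 1 ""]
  else if w ∈ (["Life", "Social", "Computer", "Physical", "Environmental"] : List String) then
    [w ++ " " ++ rest.getD 0 ""]
  else if w ∈ (["Law", "Medicine", "Business", "Theology"] : List String) then
    [w]
  else []

-- the common characterisation both ports are reduced to
def pvGo : List String → List String
  | [] => []
  | w :: rest => pvPhrase w rest ++ pvGo rest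

-- B's reversed fold computes pvGo reversed, carrying the first two words of the suffix
lemma pvB_inv (ws : List String) :
    ws.reverse.foldl pvStepB ([], "", "") = ((pvGo ws).reverse, ws.getD 0 "", ws.getD 1 "") := by
  induction ws with
  | nil => simp [pvGo]
  | cons w rest ih =>
    rw [List.reverse_cons, List.foldl_append, ih]
    simp only [List.foldl_cons, List.foldl_nil, pvStepB, pvGo, pvPhrase, List.getD_cons_zero,
      List.getD_cons_succ]
    split_ifs <;> simp

-- A's per-element contribution over the enumeration equals pvPhrase of the suffix
def pvFA (aaa : List String) (p : Int × String) : List String :=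
  if p.2 ∈ (["Arts", "Engineering"] : List String) then
    [p.2 ++ " " ++ PySem.List.pyGetD aaa (p.1 + 1) "" ++ " " ++ PySem.List.pyGetD aaa (p.1 + 2) ""]
  else if p.2 ∈ (["Life", "Social", "Computer", "Physical", "Environmental"] : List String) then
    [p.2 ++ " " ++ PySem.List.pyGetD aaa (p.1 + 1) ""]
  else if p.2 ∈ (["Law", "Medicine", "Business", "Theology"] : List String) then
    [p.2]
  else []

lemma pvGetD_drop (aaa : List String) (n k : Nat) :
    PySem.List.pyGetD aaa ((n : Int) + (k : Int)) "" = (aaa.drop n).getD k "" := by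
  have h : ((n : Int) + (k : Int)) = (((n + k : Nat)) : Int) := by push_cast; ring
  rw [h, PySem.List.pyGetD_natCast]
  simp [List.getD, List.getElem?_drop]

lemma pvA_flatMap (aaa : List String) : ∀ (n : Nat) (ws : List String), aaa.drop n = ws →
    (PySem.List.enumerate ws (n : Int)).flatMap (pvFA aaa) = pvGo ws := by
  intro n ws
  induction ws generalizing n with
  | nil => intro _; simp [PySem.List.enumerate_nil, pvGo]
  | cons w rest ih =>
    intro hdrop
    have hrest : aaa.drop (n + 1) = rest := by
      have h := (List.tail_drop (l := aaa) (i := n)).symm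
      rw [hdrop] at h
      simpa using h
    rw [PySem.List.enumerate_cons, List.flatMap_cons]
    have h1 : PySem.List.pyGetD aaa ((n : Int) + 1) "" = rest.getD 0 "" := by
      have := pvGetD_drop aaa (n + 1) 0
      rw [hrest] at this
      simpa using this
    have h2 : PySem.List.pyGetD aaa ((n : Int) + 2) "" = rest.getD 1 "" := by
      have := pvGetD_drop aaa (n + 1) 1
      rw [hrest] at this
      have e : ((n : Int) + 2) = ((n + 1 : Nat) : Int) + (1 : Nat) := by push_cast; ring
      rw [e]; simpa using this
    have hfa : pvFA aaa ((n : Int), w) = pvPhrase w rest := by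
      simp only [pvFA, pvPhrase, h1, h2]
    have e1 : ((n : Int) + 1) = ((n + 1 : Nat) : Int) := by push_cast; ring
    rw [hfa, e1, ih (n + 1) hrest]
    rfl

-- ===== VERDICT (by name: the statement is the Claim_ definition above) =====
theorem regex_filt_spec : Claim_equal_regex_filt := by
  intro sentence _ _
  unfold Spec_regex_filt regex_filt regex_filt_alt
  set aaa := (PySem.Str.split? sentence " ").getD [] with haaa
  rw [PySem.List.foldl_congr_mem (PySem.List.enumerate aaa 0) _
    (fun b p => b ++ pvFA aaa p) [] (by
      intro acc p _
      simp only [pvFA]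
      split_ifs <;> simp)]
  rw [PySem.List.foldl_append_eq_flatMap, List.nil_append]
  show _ = ((aaa.reverse.foldl pvStepB ([], "", "")).1.reverse : List String)
  rw [pvB_inv, List.reverse_reverse]
  exact pvA_flatMap aaa 0 aaa (by simp)
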